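-- pv_equiv track=rewrite | github.com/Penger13/Generative-Chatbot | data_analysis.py | get_dialogue_flow
-- ===== SOURCE A (Python) =====
-- import string
--
-- def get_dialogue_flow(dialogue: list[tuple[str|None, str|None, bool, str]]) -> str:
--     # Mapping from participant name to participant code
--     participants = {}
--     dialogue_flow = []
--     codes = list(string.ascii_uppercase)
--
--     for message in dialogue:
--         message_from = message[0]
--         message_to = message[1]
--
--         if not message_from:
--             code_from = "Anon"
--         elif message_from in participants:
--             code_from = participants[message_from]
--         else:
--             code_from = codes.pop(0)
--             participants.setdefault(message_from, code_from)
--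
--         if not message_to:
--             code_to = "Anon"
--         elif message_to in participants:
--             code_to = participants[message_to]
--         else:
--             code_to = codes.pop(0)
--             participants.setdefault(message_to, code_to)
--
--         dialogue_flow.append(f"{code_from}-{code_to}")
--
--     return ",".join(dialogue_flow)
-- ===== SOURCE B (Python) =====
-- import string
--
--
-- def get_dialogue_flow(dialogue: list[tuple[str | None, str | None, bool, str]]) -> str:
--     # Flatten the truthy participant names in order of appearance.
--     seq = [n for m in dialogue for n in (m[0], m[1]) if n]
--
--     # A participant's letter is determined directly by its rank: the number of
--     # DISTINCT participants that appear strictly before its first occurrence.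
--     # No code map and no dedup list are ever built.
--     def code(n):
--         if not n:
--             return "Anon"
--         return string.ascii_uppercase[len(set(seq[:seq.index(n)]))]
--
--     return ",".join(f"{code(m[0])}-{code(m[1])}" for m in dialogue)
-- ===== Notes on version B (the rewrite author's own statement) =====
-- stated objective: alternative
-- what changed: A maintains mutable state across one loop (a participants dict plus a codes list destructively popped from the front); B maintains no assignment state at all: it flattens the truthy names into one sequence and computes each letter as a pure function of that sequence -- the alphabet position equals len(set(prefix before the name's first occurrence)) -- recomputed per message.
import Mathlib
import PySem

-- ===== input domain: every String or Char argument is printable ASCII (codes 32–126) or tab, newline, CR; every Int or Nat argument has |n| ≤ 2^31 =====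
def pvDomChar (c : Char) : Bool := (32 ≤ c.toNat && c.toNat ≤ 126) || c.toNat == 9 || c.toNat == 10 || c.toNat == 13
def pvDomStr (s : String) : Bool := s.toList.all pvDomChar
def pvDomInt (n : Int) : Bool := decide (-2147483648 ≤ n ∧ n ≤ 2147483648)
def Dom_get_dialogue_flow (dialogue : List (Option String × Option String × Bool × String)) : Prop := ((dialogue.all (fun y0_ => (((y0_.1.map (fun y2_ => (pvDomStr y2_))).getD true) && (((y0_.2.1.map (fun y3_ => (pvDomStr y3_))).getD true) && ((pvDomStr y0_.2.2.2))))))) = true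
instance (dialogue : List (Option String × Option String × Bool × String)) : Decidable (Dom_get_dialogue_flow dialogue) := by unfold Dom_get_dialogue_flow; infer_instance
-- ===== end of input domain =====

-- B keeps no assignment state at all: instead of A's interleaved loop with a participants
-- dict and a codes list popped destructively, B flattens the truthy names and computes each
-- letter as a pure function of that sequence — the alphabet position is the number of
-- distinct names before the name's first occurrence (objective: alternative).


-- list(string.ascii_uppercase)
def pvLetters : List String := "ABCDEFGHIJKLMNOPQRSTUVWXYZ".toList.map (fun c => String.ofList [c])

-- ===== PORT A =====
-- one 'if not name / elif in participants / else pop+setdefault' block of A's loop body;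
-- 'codes.pop(0)' raises IndexError on an empty codes list: that branch is excluded by
-- Pre_get_dialogue_flow (at most 26 distinct participants) and returns "" here.
def pvCodeOf (parts : PySem.Dict String String) (codes : List String) (o : Option String) :
    String × PySem.Dict String String × List String :=
  match o with
  | none => ("Anon", parts, codes)
  | some s =>
    if s = "" then ("Anon", parts, codes)
    else if parts.contains s then ((parts.get? s).getD "", parts, codes)
    else
      match codes with
      | [] => ("", parts, [])
      | c :: rest => (c, parts.setdefault s c, rest)

def get_dialogue_flow (dialogue : List (Option String × Option String × Bool × String)) : String :=
  let st := dialogue.foldl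
    (fun st m =>
      let (code_from, parts1, codes1) := pvCodeOf st.1 st.2.1 m.1
      let (code_to, parts2, codes2) := pvCodeOf parts1 codes1 m.2.1
      (parts2, codes2, st.2.2 ++ [code_from ++ "-" ++ code_to]))
    (PySem.Dict.empty, pvLetters, ([] : List String))
  PySem.Str.join "," st.2.2

-- ===== PORT B =====
-- Python truthiness of an optional string: None and "" are falsy
def pvTruthy (o : Option String) : Option String := o.bind (fun s => if s = "" then none else some s)

-- seq = [n for m in dialogue for n in (m[0], m[1]) if n]
def pvSeq (dialogue : List (Option String × Option String × Bool × String)) : List String :=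
  dialogue.flatMap (fun m => [m.1, m.2.1].filterMap pvTruthy)

-- string.ascii_uppercase[len(set(seq[:seq.index(n)]))] if n else "Anon";
-- seq.index(n) never fails on a truthy name (it occurs in seq by construction), so the
-- .getD 0 default is never taken, and the alphabet index is in range under
-- Pre_get_dialogue_flow, so the outer .getD "" default is never taken there.
def pvCodeB (seq : List String) (o : Option String) : String :=
  match pvTruthy o with
  | none => "Anon"
  | some s =>
    pvLetters.getD (PySem.Set.ofList (seq.take ((PySem.List.index? seq s).getD 0))).length ""

def get_dialogue_flow_alt (dialogue : List (Option String × Option String × Bool × String)) : String :=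
  let seq := pvSeq dialogue
  PySem.Str.join "," (dialogue.map (fun m => pvCodeB seq m.1 ++ "-" ++ pvCodeB seq m.2.1))

-- ===== PRECONDITION & SPEC =====
-- Pre_ excludes exactly the inputs with more than 26 distinct truthy participant names,
-- on which A raises IndexError at codes.pop(0) (and B at the alphabet indexing).
def Pre_get_dialogue_flow (dialogue : List (Option String × Option String × Bool × String)) : Prop :=
  (PySem.Set.ofList (pvSeq dialogue)).length ≤ 26
instance (dialogue : List (Option String × Option String × Bool × String)) : Decidable (Pre_get_dialogue_flow dialogue) := by unfold Pre_get_dialogue_flow; infer_instance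

def pvWitness_get_dialogue_flow : (List (Option String × Option String × Bool × String)) :=
  [(some "alice", some "bob", true, "hi"), (some "bob", none, false, "ok"), (none, some "alice", true, "yo")]

def Spec_get_dialogue_flow (dialogue : List (Option String × Option String × Bool × String)) (out : String) : Prop := out = get_dialogue_flow_alt dialogue
instance (dialogue : List (Option String × Option String × Bool × String)) (out : String) : Decidable (Spec_get_dialogue_flow dialogue out) := by unfold Spec_get_dialogue_flow; infer_instance

-- ===== CLAIM (what is proved, stated in full; the proofs are below) =====
def Claim_equal_get_dialogue_flow : Prop := ∀ (dialogue : List (Option String × Option String × Bool × String)), Dom_get_dialogue_flow dialogue → Pre_get_dialogue_flow dialogue → Spec_get_dialogue_flow dialogue (get_dialogue_flow dialogue)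

-- ===== LEMMAS AND PROOFS =====

-- A-side characterisation helper: the code of a name by its position in the dedup list N
def pvCodeIdx (names : List String) (o : Option String) : String :=
  match pvTruthy o with
  | none => "Anon"
  | some s => pvLetters.getD ((PySem.List.index? names s).getD 0) ""

-- the participants dict A has built after assigning codes to the (deduplicated,
-- first-appearance-ordered) names P, letters starting at alphabet position i
def pvDictItems : List String → Nat → List (String × String)
  | [], _ => []
  | s :: t, i => (s, pvLetters.getD i "") :: pvDictItems t (i + 1)

theorem pvDictItems_append (P : List String) (s : String) (i : Nat) :
    pvDictItems (P ++ [s]) i = pvDictItems P i ++ [(s, pvLetters.getD (i + P.length) "")] := by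
  induction P generalizing i with
  | nil => simp [pvDictItems]
  | cons a t ih => simp [pvDictItems, ih, Nat.add_comm, Nat.add_left_comm]

theorem pvDict_contains (P : List String) (i : Nat) (s : String) :
    (PySem.Dict.mk (pvDictItems P i) : PySem.Dict String String).contains s = P.contains s := by
  induction P generalizing i with
  | nil => simp [pvDictItems, PySem.Dict.contains]
  | cons a t ih =>
    have := ih (i + 1)
    simp only [PySem.Dict.contains, pvDictItems, List.any_cons, List.contains_cons] at this ⊢
    rw [this]
    by_cases h : s = a
    · simp [h]
    · rw [beq_eq_false_iff_ne.mpr (Ne.symm h), beq_eq_false_iff_ne.mpr h]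

theorem pvDict_get (P : List String) (i : Nat) (s : String) :
    (PySem.Dict.mk (pvDictItems P i) : PySem.Dict String String).get? s
      = (List.idxOf? s P).map (fun j => pvLetters.getD (i + j) "") := by
  induction P generalizing i with
  | nil => simp [pvDictItems, PySem.Dict.get?, List.idxOf?]
  | cons a t ih =>
    simp only [pvDictItems, PySem.Dict.get?, List.find?_cons]
    by_cases h : a = s
    · simp [h, List.idxOf?_cons]
    · have hb : (a == s) = false := by simp [h]
      have := ih (i + 1)
      simp only [PySem.Dict.get?] at this
      simp only [hb, Bool.false_eq_true, if_false, this, List.idxOf?_cons, Option.map_map]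
      cases List.idxOf? s t <;> simp [Function.comp_def, Nat.add_comm, Nat.add_left_comm]

theorem pv_idxOf?_prefix {P N : List String} (s : String) (hm : s ∈ P) (hp : P <+: N) :
    List.idxOf? s N = List.idxOf? s P := by
  obtain ⟨t, rfl⟩ := hp
  induction P with
  | nil => simp at hm
  | cons a q ih =>
    by_cases h : a = s
    · simp [List.idxOf?_cons, h]
    · have hm' : s ∈ q := by
        rcases List.mem_cons.mp hm with rfl | hmq
        · exact absurd rfl h
        · exact hmq
      simp [List.idxOf?_cons, h, ih hm']

theorem pv_set_prefix {α : Type} [BEq α] [LawfulBEq α] (s : PySem.Set α) (ys : List α) :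
    s <+: PySem.Set.update s ys := by
  induction ys generalizing s with
  | nil => simp [PySem.Set.update]
  | cons y ys ih =>
    rw [PySem.Set.update_cons]
    refine List.IsPrefix.trans ?_ (ih _)
    rw [PySem.Set.add_eq_ite]
    split
    · exact List.prefix_refl _
    · exact ⟨[y], rfl⟩

theorem pvLetters_length : pvLetters.length = 26 := by decide

theorem pv_idxOf?_append_self (P : List String) (s : String) (h : s ∉ P) :
    List.idxOf? s (P ++ [s]) = some P.length := by
  induction P with
  | nil => simp [List.idxOf?_cons]
  | cons a t ih =>
    have ha : ¬ a = s := fun hh => h (hh ▸ List.mem_cons_self)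
    have ht : s ∉ t := fun hh => h (List.mem_cons_of_mem _ hh)
    simp [List.idxOf?_cons, ha, ih ht]

-- B's rank of a name (distinct names before its first occurrence, relative to an
-- already-seen accumulator) is its index in the deduplicated sequence
theorem pv_rank (q : List String) (acc : PySem.Set String) (s : String)
    (hq : s ∈ q) (hacc : s ∉ acc) :
    List.idxOf? s (PySem.Set.update acc q)
      = some (PySem.Set.update acc (q.take ((List.idxOf? s q).getD 0))).length := by
  induction q generalizing acc with
  | nil => simp at hq
  | cons a t ih =>
    by_cases h : a = s
    · subst h
      simp only [List.idxOf?_cons, beq_self_eq_true, if_pos, cond_true]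
      rw [PySem.Set.update_cons, PySem.Set.add_of_not_mem hacc]
      have hmem : a ∈ acc ++ [a] := by simp
      rw [pv_idxOf?_prefix a hmem (pv_set_prefix _ t), pv_idxOf?_append_self acc a hacc]
      simp [PySem.Set.update]
    · have hst : s ∈ t := by
        rcases List.mem_cons.mp hq with rfl | hmq
        · exact absurd rfl h
        · exact hmq
      obtain ⟨k, hk⟩ : ∃ k, List.idxOf? s t = some k := by
        cases hkk : List.idxOf? s t with
        | none => exact absurd (List.idxOf?_eq_none_iff.mp hkk) (by simp [hst])
        | some k => exact ⟨k, rfl⟩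
      have hidx : List.idxOf? s (a :: t) = some (k + 1) := by
        simp [List.idxOf?_cons, h, hk]
      rw [hidx, PySem.Set.update_cons]
      rw [PySem.Set.add_eq_ite]
      split
      · -- a already seen: accumulator unchanged, prefix set unchanged
        have := ih acc hst hacc
        rw [hk] at this
        simpa [List.take_succ_cons, PySem.Set.update_cons, PySem.Set.add_eq_ite, *] using this
      · -- a new: it joins the accumulator on both sides
        have hs' : s ∉ acc ++ [a] := by
          intro hmem
          rcases List.mem_append.mp hmem with hm | hm
          · exact hacc hm
          · exact h (List.mem_singleton.mp hm).symm
        have := ih (acc ++ [a]) hst hs'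
        rw [hk] at this
        simpa [List.take_succ_cons, PySem.Set.update_cons, PySem.Set.add_eq_ite, *] using this

-- bridge: B's rank-based code equals the index-based code into the dedup list
theorem pv_codeB_eq (seq : List String) (o : Option String)
    (h : ∀ s, pvTruthy o = some s → s ∈ seq) :
    pvCodeB seq o = pvCodeIdx (PySem.Set.ofList seq) o := by
  cases ho : pvTruthy o with
  | none => simp [pvCodeB, pvCodeIdx, ho]
  | some s =>
    have hs : s ∈ seq := h s ho
    have := pv_rank seq [] s hs (by simp)
    rw [PySem.Set.update_nil_left] at this
    obtain ⟨k, hk⟩ : ∃ k, List.idxOf? s seq = some k := by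
      cases hkk : List.idxOf? s seq with
      | none => exact absurd (List.idxOf?_eq_none_iff.mp hkk) (by simp [hs])
      | some k => exact ⟨k, rfl⟩
    rw [hk] at this
    simp only [pvCodeB, pvCodeIdx, ho, PySem.List.index?_eq_idxOf?, hk, this,
      Option.getD_some]
    rw [PySem.Set.update_nil_left]

-- processing one name of one message: A's block agrees with the index-based code
theorem pv_step_name (P N : List String) (o : Option String)
    (hpre : PySem.Set.update P (pvTruthy o).toList <+: N) (hN : N.length ≤ 26) :
    pvCodeOf (PySem.Dict.mk (pvDictItems P 0)) (pvLetters.drop P.length) o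
      = (pvCodeIdx N o, PySem.Dict.mk (pvDictItems (PySem.Set.update P (pvTruthy o).toList) 0),
         pvLetters.drop (PySem.Set.update P (pvTruthy o).toList).length) := by
  match o with
  | none => simp [pvCodeOf, pvCodeIdx, pvTruthy, PySem.Set.update]
  | some s =>
    by_cases hs : s = ""
    · simp [pvCodeOf, pvCodeIdx, pvTruthy, hs, PySem.Set.update]
    · have htr : pvTruthy (some s) = some s := by simp [pvTruthy, hs]
      have hupd : PySem.Set.update P (pvTruthy (some s)).toList = PySem.Set.add P s := by
        rw [htr]; simp [PySem.Set.update]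
      rw [hupd] at hpre ⊢
      by_cases hmem : s ∈ P
      · have hadd : PySem.Set.add P s = P := PySem.Set.add_of_mem hmem
        rw [hadd] at hpre ⊢
        have hcont : (PySem.Dict.mk (pvDictItems P 0) : PySem.Dict String String).contains s = true := by
          rw [pvDict_contains]; simp [hmem]
        obtain ⟨j, hj⟩ : ∃ j, List.idxOf? s P = some j := by
          cases hj : List.idxOf? s P with
          | none => exact absurd (List.idxOf?_eq_none_iff.mp hj) (by simp [hmem])
          | some j => exact ⟨j, rfl⟩
        have hidx := pv_idxOf?_prefix s hmem hpre
        simp [pvCodeOf, hs, hcont, pvDict_get, pvCodeIdx, htr, PySem.List.index?, hidx, hj]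
      · have hcont : (PySem.Dict.mk (pvDictItems P 0) : PySem.Dict String String).contains s = false := by
          rw [pvDict_contains]; simp [hmem]
        have hadd : PySem.Set.add P s = P ++ [s] := PySem.Set.add_of_not_mem hmem
        rw [hadd] at hpre ⊢
        have hlen : P.length < 26 := by
          have := hpre.length_le; simp at this; omega
        have hlt : P.length < pvLetters.length := by rw [pvLetters_length]; exact hlen
        have hdrop : pvLetters.drop P.length
            = pvLetters.getD P.length "" :: pvLetters.drop (P.length + 1) := by
          rw [List.drop_eq_getElem_cons hlt, List.getD_eq_getElem _ _ hlt]
        have hidxN : List.idxOf? s N = some P.length := by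
          rw [pv_idxOf?_prefix s (by simp) hpre, pv_idxOf?_append_self P s hmem]
        have hsd : (PySem.Dict.mk (pvDictItems P 0) : PySem.Dict String String).setdefault s (pvLetters.getD P.length "")
            = PySem.Dict.mk (pvDictItems (P ++ [s]) 0) := by
          simp [PySem.Dict.setdefault, hcont, pvDictItems_append]
        rw [hdrop]
        simp [pvCodeOf, hs, hcont, pvCodeIdx, htr, PySem.List.index?, hidxN]
        rw [← List.getD_eq_getElem?_getD]
        exact hsd

-- the whole fold of A over a suffix, started from the state reached after names P
theorem pv_main (N : List String) (hN : N.length ≤ 26) :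
    ∀ (q : List (Option String × Option String × Bool × String)) (P : List String)
      (flow : List String),
      PySem.Set.update P (q.flatMap (fun m => [m.1, m.2.1].filterMap pvTruthy)) <+: N →
      q.foldl
        (fun st m =>
          let (code_from, parts1, codes1) := pvCodeOf st.1 st.2.1 m.1
          let (code_to, parts2, codes2) := pvCodeOf parts1 codes1 m.2.1
          (parts2, codes2, st.2.2 ++ [code_from ++ "-" ++ code_to]))
        (PySem.Dict.mk (pvDictItems P 0), pvLetters.drop P.length, flow)
      = (PySem.Dict.mk (pvDictItems (PySem.Set.update P (q.flatMap (fun m => [m.1, m.2.1].filterMap pvTruthy))) 0),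
         pvLetters.drop (PySem.Set.update P (q.flatMap (fun m => [m.1, m.2.1].filterMap pvTruthy))).length,
         flow ++ q.map (fun m => pvCodeIdx N m.1 ++ "-" ++ pvCodeIdx N m.2.1)) := by
  intro q
  induction q with
  | nil => intro P flow _; simp [PySem.Set.update]
  | cons m q ih =>
    intro P flow hpre
    have hfm : ([m.1, m.2.1].filterMap pvTruthy)
        = (pvTruthy m.1).toList ++ (pvTruthy m.2.1).toList := by
      cases h1 : pvTruthy m.1 <;> cases h2 : pvTruthy m.2.1 <;>
        simp [h1, h2]
    rw [List.flatMap_cons, hfm, List.append_assoc, PySem.Set.update_append, PySem.Set.update_append] at hpre ⊢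
    have hp1 : PySem.Set.update P (pvTruthy m.1).toList <+: N :=
      ((pv_set_prefix _ _).trans (pv_set_prefix _ _)).trans hpre
    have hp2 : PySem.Set.update (PySem.Set.update P (pvTruthy m.1).toList) (pvTruthy m.2.1).toList <+: N :=
      (pv_set_prefix _ _).trans hpre
    rw [List.foldl_cons]
    have h1 := pv_step_name P N m.1 hp1 hN
    have h2 := pv_step_name (PySem.Set.update P (pvTruthy m.1).toList) N m.2.1 hp2 hN
    simp only [h1, h2]
    rw [ih _ _ hpre]
    simp

-- a truthy name of a message of the dialogue occurs in the flattened sequence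
theorem pv_mem_seq (d : List (Option String × Option String × Bool × String))
    (m : Option String × Option String × Bool × String) (hm : m ∈ d) (s : String)
    (h : pvTruthy m.1 = some s ∨ pvTruthy m.2.1 = some s) : s ∈ pvSeq d := by
  apply List.mem_flatMap.mpr
  refine ⟨m, hm, ?_⟩
  rcases h with h | h <;> simp [List.filterMap, h] <;>
    cases pvTruthy m.1 <;> simp [h] at * <;> simp [*]

-- ===== VERDICT (by name: the statement is the Claim_ definition above) =====
theorem get_dialogue_flow_spec : Claim_equal_get_dialogue_flow := by
  intro d _ hpre
  have h0 := pv_main (PySem.Set.ofList (pvSeq d)) hpre d [] []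
    (by rw [PySem.Set.update_nil_left]; exact List.prefix_refl _)
  have h1 := congrArg (fun st => PySem.Str.join "," st.2.2) h0
  have hmap : d.map (fun m => pvCodeB (pvSeq d) m.1 ++ "-" ++ pvCodeB (pvSeq d) m.2.1)
      = d.map (fun m => pvCodeIdx (PySem.Set.ofList (pvSeq d)) m.1 ++ "-"
          ++ pvCodeIdx (PySem.Set.ofList (pvSeq d)) m.2.1) := by
    apply List.map_congr_left
    intro m hm
    rw [pv_codeB_eq _ m.1 (fun s hs => pv_mem_seq d m hm s (Or.inl hs)),
        pv_codeB_eq _ m.2.1 (fun s hs => pv_mem_seq d m hm s (Or.inr hs))]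
  simp only [Spec_get_dialogue_flow, get_dialogue_flow, get_dialogue_flow_alt]
  rw [hmap]
  simp only [pvSeq] at h1 ⊢
  simpa [pvDictItems, PySem.Dict.empty] using h1
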